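-- pv_equiv track=rewrite | github.com/JafetMs/ProyectoSoftware | Proyecto3.py | Leer_codigo
-- ===== SOURCE A (Python) =====
-- def Leer_codigo(lineas):
--     # Lista para almacenar las funciones encontradas
--     # Almacena las líneas de la función que se está procesando
--     # Almacena las líneas del bloque principal del programa
--     # Indica si estamos dentro de una función
--     # Indica si estamos dentro del bloque principal
--     # Almacena el nombre de la función actual
--     funciones = []
--     funcion_actual = []
--     bloque_principal = []
--     dentro_de_funcion = False
--     dentro_de_main = False
--     nombre_funcion_actual = ""
--
--
--     for linea in lineas:
--         # Elimina espacios en blanco al inicio y al final de la línea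
--         stripped_line = linea.strip()
--
--         # Detecta el inicio de una función
--         if stripped_line.startswith('def ') and not dentro_de_main:
--
--             # Si ya estábamos procesando una función, la guarda
--             if dentro_de_funcion:
--                 funciones.append((nombre_funcion_actual, funcion_actual))
--                 # Reinicia el contenido de la función actual
--                 funcion_actual = []
--
--             dentro_de_funcion = True
--             # Extrae el nombre de la función
--             nombre_funcion_actual = stripped_line.split('(')[0][4:]
--
--         # Detecta el inicio del bloque principal
--         if stripped_line.startswith('if __name__ == "__main__":'):
--
--             # Guarda cualquier función no guardada antes de entrar al bloque principal
--             if dentro_de_funcion: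
--                 funciones.append((nombre_funcion_actual, funcion_actual))
--                 funcion_actual = []
--
--             dentro_de_main = True
--             dentro_de_funcion = False
--
--         # Añade líneas a la función o al bloque principal según corresponda
--         if dentro_de_funcion:
--             funcion_actual.append(linea)
--
--         elif dentro_de_main:
--             bloque_principal.append(linea)
--
--     # Si queda alguna función por guardar, la añade
--     if funcion_actual:
--         funciones.append((nombre_funcion_actual, funcion_actual))
--
--     return funciones, bloque_principal, lineas
-- ===== SOURCE B (Python) =====
-- MAIN = 'if __name__ == "__main__":'
--
--
-- def Leer_codigo(lineas):
--     # chunked scan with a cursor: skip until a header, cut a whole function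
--     # body out as one slice, stop at the main block
--     n = len(lineas)
--     funciones = []
--     i = 0
--     while i < n:
--         s = lineas[i].strip()
--         if s.startswith(MAIN):
--             return funciones, lineas[i:], lineas
--         if s.startswith('def '):
--             j = i + 1
--             while j < n:
--                 t = lineas[j].strip()
--                 if t.startswith('def ') or t.startswith(MAIN):
--                     break
--                 j += 1
--             funciones.append((s.split('(')[0][4:], lineas[i:j]))
--             i = j
--         else:
--             i += 1
--     return funciones, [], lineas
-- ===== Notes on version B (the rewrite author's own statement) =====
-- stated objective: alternative
-- what changed: Replaces A's single-pass state machine (dentro_de_funcion/dentro_de_main flags with per-line accumulators and deferred flushes) by a chunked scan that, at each 'def ' header, cuts the whole function body out in one inner pass and skips past it, and returns immediately on the main header.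
import Mathlib
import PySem

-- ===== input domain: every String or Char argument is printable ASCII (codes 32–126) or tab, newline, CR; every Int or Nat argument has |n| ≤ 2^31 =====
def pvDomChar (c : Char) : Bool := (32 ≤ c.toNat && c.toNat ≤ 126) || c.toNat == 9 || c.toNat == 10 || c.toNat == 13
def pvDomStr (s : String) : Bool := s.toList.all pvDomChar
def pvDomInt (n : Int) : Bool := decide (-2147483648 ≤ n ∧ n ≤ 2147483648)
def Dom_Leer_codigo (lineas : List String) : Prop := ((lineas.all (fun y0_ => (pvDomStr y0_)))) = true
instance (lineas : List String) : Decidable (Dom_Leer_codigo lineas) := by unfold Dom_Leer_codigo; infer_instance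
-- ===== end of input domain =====

-- B replaces A's flag-driven per-line accumulation with a chunked scan that cuts each
-- function body out in one inner pass (different decomposition, same cost).

-- the main-block header Python's startswith tests against
def pvMain : String := "if __name__ == \"__main__\":"

-- stripped_line.split('(')[0][4:]  (shared by both Pythons verbatim)
def pvName (s : String) : String :=
  PySem.Str.slice (((PySem.Str.split? s "(").getD []).headD "") (some 4) none

-- ===== PORT A =====
-- one loop iteration of A over state (funciones, funcion_actual, bloque, dentro_de_funcion, dentro_de_main, nombre)
def pvStepA (st : (List (String × List String)) × List String × List String × Bool × Bool × String)
    (linea : String) : (List (String × List String)) × List String × List String × Bool × Bool × String :=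
  match st with
  | (funciones, funcion_actual, bloque, dentroF, dentroM, nombre) =>
    let s := PySem.Str.strip linea
    let defCond := PySem.Str.startswith s "def " && !dentroM
    let funciones1 := if defCond then (if dentroF then funciones ++ [(nombre, funcion_actual)] else funciones) else funciones
    let fa1 := if defCond then (if dentroF then ([] : List String) else funcion_actual) else funcion_actual
    let dentroF1 := if defCond then true else dentroF
    let nombre1 := if defCond then pvName s else nombre
    let mainCond := PySem.Str.startswith s pvMain
    let funciones2 := if mainCond then (if dentroF1 then funciones1 ++ [(nombre1, fa1)] else funciones1) else funciones1
    let fa2 := if mainCond then (if dentroF1 then ([] : List String) else fa1) else fa1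
    let dentroM1 := if mainCond then true else dentroM
    let dentroF2 := if mainCond then false else dentroF1
    let fa3 := if dentroF2 then fa2 ++ [linea] else fa2
    let bloque1 := if dentroF2 then bloque else if dentroM1 then bloque ++ [linea] else bloque
    (funciones2, fa3, bloque1, dentroF2, dentroM1, nombre1)

def Leer_codigo (lineas : List String) : (List (String × List String)) × List String × List String :=
  match lineas.foldl pvStepA ([], [], [], false, false, "") with
  | (funciones, funcion_actual, bloque, _, _, nombre) =>
    (if funcion_actual.isEmpty then funciones else funciones ++ [(nombre, funcion_actual)], bloque, lineas)

-- ===== PORT B =====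
-- inner while loop: first index k >= j whose stripped line is a 'def '/main header, else len(lineas)
-- (the local variable t = lineas[j].strip() of Source B is inlined; lineas.getD j "" is lineas[j], j in range)
def pvInner (lineas : List String) (j : Nat) : Nat :=
  if h : j < lineas.length then
    if PySem.Str.startswith (PySem.Str.strip (lineas.getD j "")) "def "
        || PySem.Str.startswith (PySem.Str.strip (lineas.getD j "")) pvMain then j
    else pvInner lineas (j + 1)
  else j
  termination_by lineas.length - j
  decreasing_by omega

-- the inner loop never moves the cursor backwards (cited by pvOuterB's termination)
lemma pvInner_ge (lineas : List String) : ∀ k j, lineas.length - j ≤ k → j ≤ pvInner lineas j := by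
  intro k
  induction k with
  | zero =>
    intro j h
    rw [pvInner.eq_def, dif_neg (show ¬ j < lineas.length by omega)]
  | succ k ih =>
    intro j h
    rw [pvInner.eq_def]
    by_cases hj : j < lineas.length
    · rw [dif_pos hj]
      by_cases hcond : (PySem.Str.startswith (PySem.Str.strip (lineas.getD j "")) "def "
          || PySem.Str.startswith (PySem.Str.strip (lineas.getD j "")) pvMain) = true
      · rw [if_pos hcond]
      · rw [if_neg hcond]
        exact Nat.le_trans (Nat.le_succ j) (ih (j + 1) (by omega))
    · rw [dif_neg hj]

-- outer while loop over the cursor i (s = lineas[i].strip() of Source B is inlined)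
def pvOuterB (funciones : List (String × List String)) (lineas : List String) (i : Nat) :
    (List (String × List String)) × List String × List String :=
  if h : i < lineas.length then
    if PySem.Str.startswith (PySem.Str.strip (lineas.getD i "")) pvMain then
      (funciones, PySem.List.slice lineas (some (i : Int)) none, lineas)
    else if PySem.Str.startswith (PySem.Str.strip (lineas.getD i "")) "def " then
      pvOuterB (funciones ++ [(pvName (PySem.Str.strip (lineas.getD i "")),
          PySem.List.slice lineas (some (i : Int)) (some ((pvInner lineas (i + 1) : Nat) : Int)))])
        lineas (pvInner lineas (i + 1))
    else pvOuterB funciones lineas (i + 1)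
  else (funciones, [], lineas)
  termination_by lineas.length - i
  decreasing_by
  · have := pvInner_ge lineas (lineas.length - (i + 1)) (i + 1) (Nat.le_refl _)
    omega
  · omega

def Leer_codigo_alt (lineas : List String) : (List (String × List String)) × List String × List String :=
  pvOuterB [] lineas 0

-- ===== PRECONDITION & SPEC =====
def Spec_Leer_codigo (lineas : List String) (out : (List (String × List String)) × List String × List String) : Prop := out = Leer_codigo_alt lineas
instance (lineas : List String) (out : (List (String × List String)) × List String × List String) : Decidable (Spec_Leer_codigo lineas out) := by unfold Spec_Leer_codigo; infer_instance

-- ===== CLAIM (what is proved, stated in full; the proofs are below) =====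
def Claim_equal_Leer_codigo : Prop := ∀ (lineas : List String), Dom_Leer_codigo lineas → Spec_Leer_codigo lineas (Leer_codigo lineas)

-- ===== LEMMAS AND PROOFS =====

-- intermediate list-consuming form of B's loop, used to bridge the two ports
def pvCuerpo : List String → List String
  | [] => []
  | l :: ls =>
    if PySem.Str.startswith (PySem.Str.strip l) "def "
        || PySem.Str.startswith (PySem.Str.strip l) pvMain then []
    else l :: pvCuerpo ls

def pvLoopB (funciones : List (String × List String)) (rest lineas : List String) :
    (List (String × List String)) × List String × List String :=
  match rest with
  | [] => (funciones, [], lineas)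
  | l :: ls =>
    if PySem.Str.startswith (PySem.Str.strip l) pvMain then (funciones, l :: ls, lineas)
    else if PySem.Str.startswith (PySem.Str.strip l) "def " then
      pvLoopB (funciones ++ [(pvName (PySem.Str.strip l), l :: pvCuerpo ls)])
        (List.drop (1 + (pvCuerpo ls).length) (l :: ls)) lineas
    else pvLoopB funciones ls lineas
  termination_by rest.length
  decreasing_by
  all_goals (simp [List.length_drop]; try omega)


-- A's post-loop finalisation, as a named function for the invariant lemmas
def pvFinish (st : (List (String × List String)) × List String × List String × Bool × Bool × String)
    (lineas : List String) : (List (String × List String)) × List String × List String :=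
  match st with
  | (funciones, funcion_actual, bloque, _, _, nombre) =>
    (if funcion_actual.isEmpty then funciones else funciones ++ [(nombre, funcion_actual)], bloque, lineas)

-- a stripped line cannot start with both 'def ' and the main header
lemma pvDefNotMain (cs : List Char) (h : PySem.Chars.startswith cs ['d', 'e', 'f', ' '] = true) :
    PySem.Chars.startswith cs pvMain.toList = false := by
  by_contra hb
  rw [Bool.not_eq_false] at hb
  rw [PySem.Chars.startswith_iff] at h hb
  obtain ⟨t1, e1⟩ := h
  obtain ⟨t2, e2⟩ := hb
  rw [← e1] at e2
  simp [pvMain] at e2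

-- unfolding lemmas for B's loop, one per branch
lemma pvLoopB_main (fs : List (String × List String)) (l : String) (ls lineas : List String)
    (hm : PySem.Chars.startswith (PySem.Chars.strip l.toList) pvMain.toList = true) :
    pvLoopB fs (l :: ls) lineas = (fs, l :: ls, lineas) := by
  rw [pvLoopB.eq_def]; simp [hm]

lemma pvLoopB_def (fs : List (String × List String)) (l : String) (ls lineas : List String)
    (hm : PySem.Chars.startswith (PySem.Chars.strip l.toList) pvMain.toList = false)
    (hd : PySem.Chars.startswith (PySem.Chars.strip l.toList) ['d', 'e', 'f', ' '] = true) :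
    pvLoopB fs (l :: ls) lineas
      = pvLoopB (fs ++ [(pvName (PySem.Str.strip l), l :: pvCuerpo ls)])
          (List.drop (pvCuerpo ls).length ls) lineas := by
  rw [pvLoopB.eq_def]
  simp only [Nat.add_comm 1 (pvCuerpo ls).length, List.drop_succ_cons]
  simp [hm, hd]

lemma pvLoopB_skip (fs : List (String × List String)) (l : String) (ls lineas : List String)
    (hm : PySem.Chars.startswith (PySem.Chars.strip l.toList) pvMain.toList = false)
    (hd : PySem.Chars.startswith (PySem.Chars.strip l.toList) ['d', 'e', 'f', ' '] = false) :
    pvLoopB fs (l :: ls) lineas = pvLoopB fs ls lineas := by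
  rw [pvLoopB.eq_def]; simp [hm, hd]

-- main mode: every remaining line is appended to bloque, nothing else changes
lemma pvA_main (ls : List String) : ∀ fs bp nm,
    List.foldl pvStepA (fs, [], bp, false, true, nm) ls = (fs, [], bp ++ ls, false, true, nm) := by
  induction ls with
  | nil => intro fs bp nm; simp
  | cons l ls ih =>
    intro fs bp nm
    rw [List.foldl_cons]
    have hstep : pvStepA (fs, [], bp, false, true, nm) l = (fs, [], bp ++ [l], false, true, nm) := by
      simp only [pvStepA]
      cases hm : PySem.Chars.startswith (PySem.Chars.strip l.toList) pvMain.toList <;> simp [hm]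
    rw [hstep, ih]
    simp

-- function mode (funcion_actual nonempty): the rest of A's run produces exactly
-- the current body completed by pvCuerpo, then continues as B's loop
lemma pvA_func (ls : List String) : ∀ fs (fa : List String) nm lineas, fa ≠ [] →
    pvFinish (List.foldl pvStepA (fs, fa, [], true, false, nm) ls) lineas
      = pvLoopB (fs ++ [(nm, fa ++ pvCuerpo ls)]) (List.drop (pvCuerpo ls).length ls) lineas := by
  induction ls with
  | nil =>
    intro fs fa nm lineas hfa
    rw [pvLoopB.eq_def]
    simp [pvFinish, pvCuerpo, List.isEmpty_iff, hfa]
  | cons l ls ih =>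
    intro fs fa nm lineas hfa
    rw [List.foldl_cons]
    cases hd : PySem.Chars.startswith (PySem.Chars.strip l.toList) ['d', 'e', 'f', ' '] with
    | true =>
      have hm := pvDefNotMain _ hd
      have hstep : pvStepA (fs, fa, [], true, false, nm) l
          = (fs ++ [(nm, fa)], [l], [], true, false, pvName (PySem.Str.strip l)) := by
        simp [pvStepA, hd, hm]
      rw [hstep, ih _ _ _ _ (by simp)]
      have hc : pvCuerpo (l :: ls) = [] := by simp [pvCuerpo, hd]
      rw [hc]
      simp only [List.append_nil, List.length_nil, List.drop_zero]
      rw [pvLoopB_def _ _ _ _ hm hd]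
      simp
    | false =>
      cases hm : PySem.Chars.startswith (PySem.Chars.strip l.toList) pvMain.toList with
      | true =>
        have hstep : pvStepA (fs, fa, [], true, false, nm) l
            = (fs ++ [(nm, fa)], [], [l], false, true, nm) := by
          simp [pvStepA, hd, hm]
        rw [hstep, pvA_main]
        have hc : pvCuerpo (l :: ls) = [] := by simp [pvCuerpo, hm]
        rw [hc]
        simp only [List.append_nil, List.length_nil, List.drop_zero]
        rw [pvLoopB_main _ _ _ _ hm]
        simp [pvFinish]
      | false =>
        have hstep : pvStepA (fs, fa, [], true, false, nm) l
            = (fs, fa ++ [l], [], true, false, nm) := by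
          simp [pvStepA, hd, hm]
        rw [hstep, ih _ _ _ _ (by simp)]
        have hc : pvCuerpo (l :: ls) = l :: pvCuerpo ls := by
          simp [pvCuerpo, hd, hm]
        rw [hc]
        simp

-- scan mode (before any def/main): A's run from the initial flags equals B's loop
lemma pvA_scan (ls : List String) : ∀ fs nm lineas,
    pvFinish (List.foldl pvStepA (fs, [], [], false, false, nm) ls) lineas = pvLoopB fs ls lineas := by
  induction ls with
  | nil => intro fs nm lineas; rw [pvLoopB.eq_def]; simp [pvFinish]
  | cons l ls ih =>
    intro fs nm lineas
    rw [List.foldl_cons]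
    cases hd : PySem.Chars.startswith (PySem.Chars.strip l.toList) ['d', 'e', 'f', ' '] with
    | true =>
      have hm := pvDefNotMain _ hd
      have hstep : pvStepA (fs, [], [], false, false, nm) l
          = (fs, [l], [], true, false, pvName (PySem.Str.strip l)) := by
        simp [pvStepA, hd, hm]
      rw [hstep, pvA_func _ _ _ _ _ (by simp), pvLoopB_def _ _ _ _ hm hd]
      simp
    | false =>
      cases hm : PySem.Chars.startswith (PySem.Chars.strip l.toList) pvMain.toList with
      | true =>
        have hstep : pvStepA (fs, [], [], false, false, nm) l
            = (fs, [], [l], false, true, nm) := by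
          simp [pvStepA, hd, hm]
        rw [hstep, pvA_main, pvLoopB_main _ _ _ _ hm]
        simp [pvFinish]
      | false =>
        have hstep : pvStepA (fs, [], [], false, false, nm) l
            = (fs, [], [], false, false, nm) := by
          simp [pvStepA, hd, hm]
        rw [hstep, ih, pvLoopB_skip _ _ _ _ hm hd]

-- B side: the cursor loops compute the list-consuming form
lemma pvDrop_cons (lineas : List String) (i : Nat) (h : i < lineas.length) :
    List.drop i lineas = lineas.getD i "" :: List.drop (i + 1) lineas := by
  rw [List.getD_eq_getElem lineas "" h]
  exact List.drop_eq_getElem_cons h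

lemma pvInner_eq (lineas : List String) : ∀ k j, lineas.length - j ≤ k →
    pvInner lineas j = j + (pvCuerpo (List.drop j lineas)).length := by
  intro k
  induction k with
  | zero =>
    intro j h
    rw [pvInner.eq_def, dif_neg (show ¬ j < lineas.length by omega),
      List.drop_eq_nil_iff.mpr (by omega)]
    simp [pvCuerpo]
  | succ k ih =>
    intro j h
    rw [pvInner.eq_def]
    by_cases hj : j < lineas.length
    · rw [dif_pos hj, pvDrop_cons lineas j hj]
      by_cases hcond : (PySem.Str.startswith (PySem.Str.strip (lineas.getD j "")) "def "
          || PySem.Str.startswith (PySem.Str.strip (lineas.getD j "")) pvMain) = true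
      · rw [if_pos hcond]
        have hc : pvCuerpo (lineas.getD j "" :: List.drop (j + 1) lineas) = [] := by
          rw [pvCuerpo, if_pos hcond]
        rw [hc]
        simp
      · rw [if_neg hcond]
        have hc : pvCuerpo (lineas.getD j "" :: List.drop (j + 1) lineas)
            = lineas.getD j "" :: pvCuerpo (List.drop (j + 1) lineas) := by
          rw [pvCuerpo, if_neg hcond]
        rw [hc, ih (j + 1) (by omega), List.length_cons]
        omega
    · rw [dif_neg hj, List.drop_eq_nil_iff.mpr (by omega)]
      simp [pvCuerpo]

lemma pvTake_cuerpo (ls : List String) : List.take (pvCuerpo ls).length ls = pvCuerpo ls := by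
  induction ls with
  | nil => simp [pvCuerpo]
  | cons l ls ih =>
    rw [pvCuerpo]
    by_cases hcond : (PySem.Str.startswith (PySem.Str.strip l) "def "
        || PySem.Str.startswith (PySem.Str.strip l) pvMain) = true
    · rw [if_pos hcond]
      simp
    · rw [if_neg hcond, List.length_cons, List.take_succ_cons, ih]

lemma pvOuter_eq (lineas : List String) : ∀ k i fs, lineas.length - i ≤ k →
    pvOuterB fs lineas i = pvLoopB fs (List.drop i lineas) lineas := by
  intro k
  induction k with
  | zero =>
    intro i fs h
    rw [pvOuterB.eq_def, dif_neg (show ¬ i < lineas.length by omega),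
      List.drop_eq_nil_iff.mpr (by omega), pvLoopB.eq_def]
  | succ k ih =>
    intro i fs h
    rw [pvOuterB.eq_def]
    by_cases hi : i < lineas.length
    · rw [dif_pos hi]
      set l := lineas.getD i "" with hl
      have hdrop : List.drop i lineas = l :: List.drop (i + 1) lineas := pvDrop_cons lineas i hi
      rw [hdrop]
      by_cases hmS : PySem.Str.startswith (PySem.Str.strip l) pvMain = true
      · rw [if_pos hmS, pvLoopB_main _ _ _ _ (by simpa using hmS),
          PySem.List.slice_from lineas (Int.natCast_nonneg i)]
        simp [hdrop]
      · rw [if_neg hmS]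
        by_cases hdS : PySem.Str.startswith (PySem.Str.strip l) "def " = true
        · rw [if_pos hdS]
          have hmC : PySem.Chars.startswith (PySem.Chars.strip l.toList) pvMain.toList = false := by
            simpa using hmS
          have hdC : PySem.Chars.startswith (PySem.Chars.strip l.toList) ['d', 'e', 'f', ' '] = true := by
            simpa using hdS
          rw [pvLoopB_def _ _ _ _ hmC hdC]
          have hin := pvInner_eq lineas (lineas.length - (i + 1)) (i + 1) (Nat.le_refl _)
          set c := pvCuerpo (List.drop (i + 1) lineas) with hc
          have hslice : PySem.List.slice lineas (some (i : Int)) (some ((pvInner lineas (i + 1) : Nat) : Int))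
              = l :: c := by
            rw [PySem.List.slice_toNat lineas (Int.natCast_nonneg i) (Int.natCast_nonneg _)]
            simp only [Int.toNat_natCast]
            rw [hin, show i + 1 + c.length - i = c.length + 1 by omega,
              hdrop, List.take_succ_cons, hc, pvTake_cuerpo]
          rw [hslice, ih (pvInner lineas (i + 1)) _ (by rw [hin]; omega), hin]
          have hdd : List.drop (i + 1 + c.length) lineas
              = List.drop c.length (List.drop (i + 1) lineas) := by
            rw [List.drop_drop]
          rw [hdd]
        · rw [if_neg hdS, pvLoopB_skip _ _ _ _ (by simpa using hmS) (by simpa using hdS),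
            ih (i + 1) fs (by omega)]
    · rw [dif_neg hi, List.drop_eq_nil_iff.mpr (by omega), pvLoopB.eq_def]

-- ===== VERDICT (by name: the statement is the Claim_ definition above) =====
theorem Leer_codigo_spec : Claim_equal_Leer_codigo := by
  intro lineas _
  show Leer_codigo lineas = Leer_codigo_alt lineas
  have hB : Leer_codigo_alt lineas = pvLoopB [] lineas lineas := by
    unfold Leer_codigo_alt
    rw [pvOuter_eq lineas lineas.length 0 [] (by omega)]
    rfl
  have h := pvA_scan lineas [] "" lineas
  rw [hB, ← h]
  unfold Leer_codigo
  rcases List.foldl pvStepA ([], [], [], false, false, "") lineas with ⟨a, b, c, d, e, f⟩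
  simp [pvFinish]
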